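-- pv_equiv track=rewrite | github.com/BrettKennedy/VAAST_Accessory_Scripts | manhattan/manhattaned_grid.py | last_list
-- ===== SOURCE A (Python) =====
-- def last_list(genes,chroms):
-- 	last=[0]
-- 	for i in range(len(chroms)):
-- 		alcor=[]
-- 		for j in genes[chroms[i]].keys():
-- 			alcor.append(genes[chroms[i]][j]['coord'])
-- 		if len(last) > 1:
-- 			last.append(max(alcor)+last[i])
-- 		else:
-- 			last.append(max(alcor))
-- 	return last
-- ===== SOURCE B (Python) =====
-- def last_list(genes, chroms):
--     # Build the result back-to-front: walk the chromosomes in REVERSE order;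
--     # each step shifts the already-built suffix of cumulative offsets by the
--     # current chromosome's maximal coordinate and prepends a fresh 0.
--     out = [0]
--     for c in reversed(chroms):
--         m = max(g['coord'] for g in genes[c].values())
--         out = [0] + [m + x for x in out]
--     return out
-- ===== Notes on version B (the rewrite author's own statement) =====
-- stated objective: alternative
-- what changed: Instead of A's forward index loop that threads a running total (appending max+last[i]), B builds the list back-to-front: it walks the chromosomes in reverse and at each step shifts every element of the already-built suffix by the current chromosome's maximum and prepends 0 — no running total, no index back-references.
import Mathlib
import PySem

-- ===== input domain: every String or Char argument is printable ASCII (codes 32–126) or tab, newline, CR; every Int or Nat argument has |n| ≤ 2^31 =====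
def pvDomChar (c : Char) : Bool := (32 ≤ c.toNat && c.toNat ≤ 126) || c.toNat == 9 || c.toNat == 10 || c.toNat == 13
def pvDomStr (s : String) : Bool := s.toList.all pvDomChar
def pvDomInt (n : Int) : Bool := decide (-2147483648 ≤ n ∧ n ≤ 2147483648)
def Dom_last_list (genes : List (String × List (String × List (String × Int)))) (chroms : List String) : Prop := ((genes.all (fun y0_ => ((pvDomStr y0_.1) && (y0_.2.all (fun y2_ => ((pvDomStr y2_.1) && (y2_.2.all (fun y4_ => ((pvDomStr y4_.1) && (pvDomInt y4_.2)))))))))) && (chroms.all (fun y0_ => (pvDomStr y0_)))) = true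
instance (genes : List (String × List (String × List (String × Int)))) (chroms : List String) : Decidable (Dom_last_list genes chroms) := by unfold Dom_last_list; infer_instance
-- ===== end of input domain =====

-- B builds the result back-to-front: reverse walk over chroms, shifting the built suffix by each max and prepending 0; objective: alternative.
-- ===== PORT A =====
def last_list (genes : List (String × List (String × List (String × Int)))) (chroms : List String) : List Int :=
  (PySem.List.pyRange 0 chroms.length 1).foldl
    (fun last i =>
      let c := PySem.List.pyGetD chroms i ""
      let d := PySem.Dict.ofList ((PySem.Dict.ofList genes).getD c [])
      let alcor := d.keys.foldl
        (fun acc j => acc ++ [PySem.Dict.getD (PySem.Dict.ofList (d.getD j [])) "coord" 0]) []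
      let m := (PySem.List.max? alcor (fun x => x)).getD 0
      if last.length > 1 then last ++ [m + PySem.List.pyGetD last i 0]
      else last ++ [m])
    [0]

-- ===== PORT B =====
def last_list_alt (genes : List (String × List (String × List (String × Int)))) (chroms : List String) : List Int :=
  chroms.reverse.foldl
    (fun out c =>
      let m := (PySem.List.max?
        (((PySem.Dict.ofList ((PySem.Dict.ofList genes).getD c [])).values).map
          (fun g => PySem.Dict.getD (PySem.Dict.ofList g) "coord" 0))
        (fun x => x)).getD 0
      0 :: out.map (fun x => m + x))
    [0]

-- ===== PRECONDITION & SPEC =====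
-- Pre_ excludes exactly the inputs where Python A raises: a chromosome missing from genes
-- (KeyError), an empty gene dict (ValueError from max([])), or a gene entry without a
-- 'coord' key (KeyError); Python B raises on the very same inputs.
def Pre_last_list (genes : List (String × List (String × List (String × Int)))) (chroms : List String) : Prop :=
  chroms.all (fun c =>
    match (PySem.Dict.ofList genes).get? c with
    | none => false
    | some gl =>
      (!gl.isEmpty) &&
        (PySem.Dict.ofList gl).items.all
          (fun p => ((PySem.Dict.ofList p.2).get? "coord").isSome)) = true
instance (genes : List (String × List (String × List (String × Int)))) (chroms : List String) : Decidable (Pre_last_list genes chroms) := by unfold Pre_last_list; infer_instance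

def pvWitness_last_list : (List (String × List (String × List (String × Int)))) × List String :=
  ([("1", [("a", [("coord", 3)]), ("b", [("coord", 7)])]), ("2", [("c", [("coord", 2)])])], ["1", "2"])

def Spec_last_list (genes : List (String × List (String × List (String × Int)))) (chroms : List String) (out : List Int) : Prop := out = last_list_alt genes chroms
instance (genes : List (String × List (String × List (String × Int)))) (chroms : List String) (out : List Int) : Decidable (Spec_last_list genes chroms out) := by unfold Spec_last_list; infer_instance

-- ===== CLAIM (what is proved, stated in full; the proofs are below) =====
def Claim_equal_last_list : Prop := ∀ (genes : List (String × List (String × List (String × Int)))) (chroms : List String), Dom_last_list genes chroms → Pre_last_list genes chroms → Spec_last_list genes chroms (last_list genes chroms)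

-- ===== LEMMAS AND PROOFS =====

-- prefix sums starting after a running total t
def pacc (t : Int) : List Int → List Int
  | [] => []
  | m :: ms => (t + m) :: pacc (t + m) ms

theorem pacc_append (t : Int) (ms : List Int) (m : Int) :
    pacc t (ms ++ [m]) = pacc t ms ++ [t + ms.sum + m] := by
  induction ms generalizing t with
  | nil => simp [pacc]
  | cons a ms ih => simp [pacc, ih (t + a)]; ring_nf

theorem pacc_getD_last (t : Int) (ms : List Int) (d : Int) :
    (t :: pacc t ms).getD ms.length d = t + ms.sum := by
  induction ms generalizing t with
  | nil => simp [pacc]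
  | cons a ms ih => simpa [pacc, add_assoc] using ih (t + a)

theorem pacc_length (t : Int) (ms : List Int) : (pacc t ms).length = ms.length := by
  induction ms generalizing t with
  | nil => rfl
  | cons a ms ih => simp [pacc, ih]

theorem pacc_map_add (a t : Int) (ms : List Int) :
    (pacc t ms).map (fun x => a + x) = pacc (a + t) ms := by
  induction ms generalizing t with
  | nil => rfl
  | cons m ms ih => simp [pacc, ih (t + m), add_assoc]

-- B's reverse walk with elementwise shift produces 0 :: prefix sums of the maxima
theorem foldB (μ : String → Int) (cs : List String) :
    cs.reverse.foldl (fun out c => 0 :: out.map (fun x => μ c + x)) [0]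
      = 0 :: pacc 0 (cs.map μ) := by
  induction cs with
  | nil => simp [pacc]
  | cons c cs ih =>
    rw [List.reverse_cons, List.foldl_append, ih]
    simp [pacc, pacc_map_add]

-- A's interleaved index loop, abstracted over the per-chromosome value μ
theorem foldA (μ : String → Int) (cs : List String) :
    (PySem.List.pyRange 0 cs.length 1).foldl
      (fun (last : List Int) i =>
        let m := μ (PySem.List.pyGetD cs i "")
        if last.length > 1 then last ++ [m + PySem.List.pyGetD last i 0]
        else last ++ [m]) [0]
      = 0 :: pacc 0 (cs.map μ) := by
  induction cs using List.reverseRecOn with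
  | nil => simp [PySem.List.pyRange_one_eq_nil, pacc]
  | append_singleton cs c ih =>
    have hlen : ((cs ++ [c]).length : Int) = (cs.length : Int) + 1 := by simp
    rw [hlen, PySem.List.pyRange_one_succ_right (by positivity), List.foldl_append]
    have h : ∀ (acc : List Int), ∀ x ∈ PySem.List.pyRange 0 cs.length 1,
        (fun (last : List Int) i =>
          let m := μ (PySem.List.pyGetD (cs ++ [c]) i "")
          if last.length > 1 then last ++ [m + PySem.List.pyGetD last i 0]
          else last ++ [m]) acc x
        = (fun (last : List Int) i =>
          let m := μ (PySem.List.pyGetD cs i "")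
          if last.length > 1 then last ++ [m + PySem.List.pyGetD last i 0]
          else last ++ [m]) acc x := by
      intro acc x hx
      rw [PySem.List.mem_pyRange_one] at hx
      have hget : PySem.List.pyGetD (cs ++ [c]) x "" = PySem.List.pyGetD cs x "" := by
        rw [PySem.List.pyGetD_eq_getElem (cs ++ [c]) "" hx.1 (by simp; omega),
            PySem.List.pyGetD_eq_getElem cs "" hx.1 hx.2]
        rw [List.getElem_append_left (by omega)]
      simp only [hget]
    have hpre := Eq.trans (PySem.List.foldl_congr_mem _ _ _ _ h) ih
    rw [hpre]
    simp only [List.foldl_cons, List.foldl_nil]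
    have hc : PySem.List.pyGetD (cs ++ [c]) (cs.length : Int) "" = c := by
      rw [PySem.List.pyGetD_natCast]; simp
    rw [hc]
    cases cs with
    | nil => simp [pacc]
    | cons a as =>
      have hgt : (0 :: pacc 0 ((a :: as).map μ)).length > 1 := by
        simp [pacc_length]
      rw [if_pos hgt]
      have hlast : PySem.List.pyGetD (0 :: pacc 0 ((a :: as).map μ)) ((a :: as).length : Int) 0
          = 0 + ((a :: as).map μ).sum := by
        rw [PySem.List.pyGetD_natCast]
        have := pacc_getD_last 0 ((a :: as).map μ) 0
        simpa using this
      rw [hlast,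
        show List.map μ (a :: as ++ [c]) = List.map μ (a :: as) ++ [μ c] by simp,
        pacc_append]
      simp
      ring_nf

-- the per-chromosome value computed by A (keys loop + lookups) equals B's (map over values)
theorem alcor_eq (gl : List (String × List (String × Int))) :
    (PySem.Dict.ofList gl).keys.foldl
      (fun acc j => acc ++ [PySem.Dict.getD (PySem.Dict.ofList (PySem.Dict.getD (PySem.Dict.ofList gl) j [])) "coord" 0]) []
    = ((PySem.Dict.ofList gl).values).map
        (fun g => PySem.Dict.getD (PySem.Dict.ofList g) "coord" 0) := by
  rw [PySem.List.foldl_append_singleton_eq_map]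
  simp only [List.nil_append, PySem.Dict.keys, PySem.Dict.values, List.map_map]
  apply List.map_congr_left
  intro p hp
  obtain ⟨k, v⟩ := p
  have hnd : (PySem.Dict.ofList gl).keys.Nodup := PySem.Dict.nodup_keys_ofList gl
  have hkv : (PySem.Dict.ofList gl).getD k [] = v :=
    PySem.Dict.getD_of_mem_items (PySem.Dict.ofList gl) hp hnd []
  simp [hkv]

-- ===== VERDICT (by name: the statement is the Claim_ definition above) =====
theorem last_list_spec : Claim_equal_last_list := by
  intro genes chroms _ _
  unfold Spec_last_list last_list last_list_alt
  simp only [alcor_eq]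
  exact Eq.trans
    (foldA (fun c =>
      (PySem.List.max?
        (((PySem.Dict.ofList ((PySem.Dict.ofList genes).getD c [])).values).map
          (fun g => PySem.Dict.getD (PySem.Dict.ofList g) "coord" 0))
        (fun x => x)).getD 0) chroms)
    (foldB (fun c =>
      (PySem.List.max?
        (((PySem.Dict.ofList ((PySem.Dict.ofList genes).getD c [])).values).map
          (fun g => PySem.Dict.getD (PySem.Dict.ofList g) "coord" 0))
        (fun x => x)).getD 0) chroms).symm
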